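-- pv_equiv track=rewrite | github.com/Gaelofg/experimento | python/listas/#4.py | proceso
-- ===== SOURCE A (Python) =====
-- def proceso(nombres,vocal):
--     consonantes=[]
--     vocales=[]
--     for i in nombres:
--         if i[0].lower() in vocal:
--             vocales.append(i)
--         else:
--             consonantes.append(i)
--     consonantes.sort()
--     vocales.sort()
--     return consonantes,vocales,len(consonantes),len(vocales)
-- ===== SOURCE B (Python) =====
-- def proceso(nombres, vocal):
--     # incremental insertion sort: one pass, each name is inserted directly at its
--     # sorted position in its group; no sort() calls at all
--     consonantes = []
--     vocales = []
--     for i in nombres: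
--         destino = vocales if i[0].lower() in vocal else consonantes
--         k = 0
--         while k < len(destino) and not (i < destino[k]):
--             k += 1
--         destino.insert(k, i)
--     return consonantes, vocales, len(consonantes), len(vocales)
-- ===== Notes on version B (the rewrite author's own statement) =====
-- stated objective: alternative
-- what changed: B replaces A's partition-then-two-sorts with a single pass that inserts each name directly at its sorted position in its group (incremental insertion sort, no sort() call); correct because an in-order insertion after all <=-equal elements keeps each group sorted and equal strings are indistinguishable.
import Mathlib
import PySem

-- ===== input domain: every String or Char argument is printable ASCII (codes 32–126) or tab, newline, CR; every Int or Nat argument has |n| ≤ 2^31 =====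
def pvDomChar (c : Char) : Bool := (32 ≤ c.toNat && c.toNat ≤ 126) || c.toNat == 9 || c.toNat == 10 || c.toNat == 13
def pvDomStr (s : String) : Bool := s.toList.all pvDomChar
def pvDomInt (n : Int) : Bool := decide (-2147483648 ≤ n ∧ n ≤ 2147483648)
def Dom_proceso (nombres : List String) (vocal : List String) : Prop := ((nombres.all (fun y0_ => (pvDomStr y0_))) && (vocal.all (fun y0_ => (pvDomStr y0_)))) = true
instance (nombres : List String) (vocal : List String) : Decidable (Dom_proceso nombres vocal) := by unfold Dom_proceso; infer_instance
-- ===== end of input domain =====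

-- B replaces partition-then-two-sorts by a single pass that keeps each group sorted via
-- insertion at the sorted position (incremental insertion sort; alternative, not faster).

-- ===== PORT A =====
-- shared test: i[0].lower() in vocal  (none = IndexError on the empty string, excluded by Pre_)
def pvTest (vocal : List String) (i : String) : Bool :=
  match PySem.Str.pyGet? i 0 with
  | some c => decide (String.ofList [PySem.Chars.lowerChar c] ∈ vocal)
  | none => false

def proceso (nombres : List String) (vocal : List String) : List String × List String × Int × Int :=
  let acc := nombres.foldl
    (fun (acc : List String × List String) i =>
      if pvTest vocal i then (acc.1, acc.2 ++ [i]) else (acc.1 ++ [i], acc.2))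
    ([], [])
  let consonantes := PySem.List.sorted acc.1 (fun x => x) false
  let vocales := PySem.List.sorted acc.2 (fun x => x) false
  (consonantes, vocales, (consonantes.length : Int), (vocales.length : Int))

-- ===== PORT B =====
-- Source B's inner while-loop + insert: scan past every element ≤ x, insert x there
def pvInsort (x : String) : List String → List String
  | [] => [x]
  | y :: ys => if x < y then x :: y :: ys else y :: pvInsort x ys

def proceso_alt (nombres : List String) (vocal : List String) : List String × List String × Int × Int :=
  let acc := nombres.foldl
    (fun (acc : List String × List String) i =>
      if pvTest vocal i then (acc.1, pvInsort i acc.2) else (pvInsort i acc.1, acc.2))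
    ([], [])
  (acc.1, acc.2, (acc.1.length : Int), (acc.2.length : Int))

-- ===== PRECONDITION & SPEC =====
-- Pre_ excludes the inputs where the Python raises IndexError: an empty string in nombres (i[0]).
def Pre_proceso (nombres : List String) (vocal : List String) : Prop := "" ∉ nombres
instance (nombres : List String) (vocal : List String) : Decidable (Pre_proceso nombres vocal) := by unfold Pre_proceso; infer_instance
def pvWitness_proceso : List String × List String := (["ana", "Bruno", "eva"], ["a", "e", "i", "o", "u"])

def Spec_proceso (nombres : List String) (vocal : List String) (out : List String × List String × Int × Int) : Prop := out = proceso_alt nombres vocal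
instance (nombres : List String) (vocal : List String) (out : List String × List String × Int × Int) : Decidable (Spec_proceso nombres vocal out) := by unfold Spec_proceso; infer_instance

-- ===== CLAIM (what is proved, stated in full; the proofs are below) =====
def Claim_equal_proceso : Prop := ∀ (nombres : List String) (vocal : List String), Dom_proceso nombres vocal → Pre_proceso nombres vocal → Spec_proceso nombres vocal (proceso nombres vocal)

-- ===== LEMMAS AND PROOFS =====

-- A's partition foldl appends the two filters
theorem pvPartition (p : String → Bool) (l : List String) (acc : List String × List String) :
    l.foldl (fun (acc : List String × List String) i =>
      if p i then (acc.1, acc.2 ++ [i]) else (acc.1 ++ [i], acc.2)) acc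
    = (acc.1 ++ l.filter (fun i => !p i), acc.2 ++ l.filter p) := by
  induction l generalizing acc with
  | nil => simp
  | cons x xs ih =>
    by_cases h : p x <;> simp [h, ih]

-- Source B's insertion is PySem's insertBy with the strict-less test
theorem pvInsort_eq_insertBy (x : String) (l : List String) :
    pvInsort x l = PySem.List.insertBy (fun a b => decide (a < b)) x l := by
  induction l with
  | nil => rfl
  | cons y ys ih => by_cases h : x < y <;> simp [pvInsort, PySem.List.insertBy, h, ih]

-- B's interleaved fold splits into two independent insertion folds over the filters
theorem pvSplit (p : String → Bool) (l : List String) (acc : List String × List String) :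
    l.foldl (fun (acc : List String × List String) i =>
      if p i then (acc.1, pvInsort i acc.2) else (pvInsort i acc.1, acc.2)) acc
    = ((l.filter (fun i => !p i)).foldl (fun a i => pvInsort i a) acc.1,
       (l.filter p).foldl (fun a i => pvInsort i a) acc.2) := by
  induction l generalizing acc with
  | nil => simp
  | cons x xs ih =>
    by_cases h : p x <;> simp [h, ih]

-- folding the insertions from [] is exactly PySem's sorted (which IS insertion sort)
theorem pvFoldInsort (l : List String) :
    l.foldl (fun a i => pvInsort i a) [] = PySem.List.sorted l (fun x => x) false := by
  rw [PySem.List.sorted_eq_foldl_insertBy]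
  simp [pvInsort_eq_insertBy]

-- ===== VERDICT (by name: the statement is the Claim_ definition above) =====
theorem proceso_spec : Claim_equal_proceso := by
  intro nombres vocal _ _
  unfold Spec_proceso proceso proceso_alt
  simp only [pvPartition, List.nil_append, pvSplit, pvFoldInsort]
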